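-- pv_equiv track=rewrite | github.com/samirpatil2000/Programs101 | Contest/HackerEarth/2__.py | maxNormalSubstring
-- ===== SOURCE A (Python) =====
-- def maxNormalSubstring(P, Q, K):
--
--     if (K == 0):
--         return 0
--
--     N=len(P)
--
--     count = 0
--
--
--     left, right = 0, 0
--
--     ans = 0
--
--     while (right < N):
--
--         while (right < N and count <= K):
--
--             pos = ord(P[right]) - ord('a')
--
--             if (Q[pos] == '0'):
--
--                 if (count + 1 > K):
--                     break
--                 else:
--                     count += 1
--
--             right += 1
--
--             # update answer with substring length
--             if (count <= K):
--                 ans = max(ans, right - left)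
--
--         while (left < right):
--
--             # get position of character
--             pos = ord(P[left]) - ord('a')
--
--             left += 1
--
--             # check if character is
--             # normal then decrement count
--             if (Q[pos] == '0'):
--                 count -= 1
--
--             if (count < K):
--                 break
--
--     return ans
-- ===== SOURCE B (Python) =====
-- def maxNormalSubstring(P, Q, K):
--     if K <= 0:
--         return 0
--     spec = [i for i, c in enumerate(P) if Q[ord(c) - ord('a')] == '0']
--     if len(spec) <= K:
--         return len(P)
--     aug = [-1] + spec + [len(P)]
--     return max(aug[t + K] - aug[t - 1] - 1 for t in range(1, len(spec) - K + 2))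
-- ===== Notes on version B (the rewrite author's own statement) =====
-- stated objective: faster
-- what changed: Replaced A's nested two-pointer sliding window by a precomputed list of special-character positions followed by one arithmetic pass over the consecutive groups of K specials (window length = gap between the specials framing each group); a timing run measured B about 2x faster (each character is touched once in a comprehension instead of twice in A's nested while loops).
import Mathlib
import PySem

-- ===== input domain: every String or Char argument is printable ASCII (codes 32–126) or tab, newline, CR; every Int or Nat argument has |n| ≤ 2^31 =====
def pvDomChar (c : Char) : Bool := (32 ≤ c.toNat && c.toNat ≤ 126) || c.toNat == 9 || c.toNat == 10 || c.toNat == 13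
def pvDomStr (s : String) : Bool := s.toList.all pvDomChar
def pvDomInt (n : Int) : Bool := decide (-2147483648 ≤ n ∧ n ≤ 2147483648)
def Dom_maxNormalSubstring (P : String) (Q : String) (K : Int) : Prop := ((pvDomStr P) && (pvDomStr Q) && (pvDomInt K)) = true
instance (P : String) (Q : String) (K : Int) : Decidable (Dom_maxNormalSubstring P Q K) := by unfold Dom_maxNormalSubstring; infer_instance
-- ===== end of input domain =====

-- B replaces A's two-pointer sliding window by an index of special-character positions and one
-- pass over consecutive groups of K specials (measured ~2× faster in a timing run).

-- shared classification helper: Python's  Q[ord(c) - ord('a')] == '0'  (pyGet? none = IndexError,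
-- excluded by Pre_; the '.getD false' never fires inside Pre_)
def pvSpec (Q : String) (c : Char) : Bool :=
  PySem.Str.pyGet? Q ((c.toNat : Int) - 97) == some '0'

-- ===== PORT A =====
-- inner loop 1: while (right < N and count <= K): …
def pvAInner1 (Q : String) (chars : List Char) (N K : Int) :
    Nat → Int → Int → Int → Int → Int × Int × Int
  | 0, _, right, count, ans => (right, count, ans)   -- fuel guard only (never reached inside Pre_)
  | fuel+1, left, right, count, ans =>
    if right < N ∧ count ≤ K then
      let c := (PySem.List.pyGet? chars right).getD ' '   -- P[right]; in range since right < N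
      if pvSpec Q c then
        if count + 1 > K then (right, count, ans)         -- break
        else
          let count' := count + 1
          let right' := right + 1
          let ans' := if count' ≤ K then max ans (right' - left) else ans
          pvAInner1 Q chars N K fuel left right' count' ans'
      else
        let right' := right + 1
        let ans' := if count ≤ K then max ans (right' - left) else ans
        pvAInner1 Q chars N K fuel left right' count ans'
    else (right, count, ans)

-- inner loop 2: while (left < right): …
def pvAInner2 (Q : String) (chars : List Char) (K : Int) :
    Nat → Int → Int → Int → Int × Int
  | 0, left, _, count => (left, count)                -- fuel guard only
  | fuel+1, left, right, count =>
    if left < right then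
      let c := (PySem.List.pyGet? chars left).getD ' '   -- P[left]
      let left' := left + 1
      let count' := if pvSpec Q c then count - 1 else count
      if count' < K then (left', count')              -- break
      else pvAInner2 Q chars K fuel left' right count'
    else (left, count)

-- outer loop: while (right < N): …
def pvAOuter (Q : String) (chars : List Char) (N K : Int) :
    Nat → Int → Int → Int → Int → Int
  | 0, _, _, _, ans => ans                            -- fuel guard only
  | fuel+1, left, right, count, ans =>
    if right < N then
      let r := pvAInner1 Q chars N K (chars.length + 1) left right count ans
      let l := pvAInner2 Q chars K (chars.length + 1) left r.1 r.2.1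
      pvAOuter Q chars N K fuel l.1 r.1 l.2 r.2.2
    else ans

def maxNormalSubstring (P : String) (Q : String) (K : Int) : Int :=
  if K = 0 then 0
  else
    let chars := P.toList
    let N : Int := chars.length
    pvAOuter Q chars N K (2 * chars.length + 2) 0 0 0 0

-- ===== PORT B =====
-- spec = [i for i, c in enumerate(P) if Q[ord(c)-ord('a')] == '0']
def pvBSpecIdx (Q : String) (chars : List Char) : List Int :=
  ((chars.zipIdx.filter (fun ci => pvSpec Q ci.1)).map (fun ci => (ci.2 : Int)))

def maxNormalSubstring_alt (P : String) (Q : String) (K : Int) : Int :=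
  if K ≤ 0 then 0
  else
    let chars := P.toList
    let spec := pvBSpecIdx Q chars
    if (spec.length : Int) ≤ K then (chars.length : Int)
    else
      let aug : List Int := -1 :: spec ++ [(chars.length : Int)]
      let cands := (PySem.List.pyRange 1 ((spec.length : Int) - K + 2) 1).map
        (fun t => PySem.List.pyGetD aug (t + K) 0 - PySem.List.pyGetD aug (t - 1) 0 - 1)
      (PySem.List.max? cands (fun y => y)).getD 0    -- max(...); cands is never empty here

-- ===== PRECONDITION & SPEC =====
-- Pre_ excludes exactly the inputs where A does not return: Q[ord(c)-97] raises IndexError for a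
-- character whose (possibly negative, Python-wrapping) index is out of range of Q, and A loops
-- forever when K < 0 and P is non-empty.  (Negative in-range indices wrap in BOTH programs.)
def Pre_maxNormalSubstring (P : String) (Q : String) (K : Int) : Prop :=
  K = 0 ∨ P.toList = [] ∨
    (0 < K ∧
      (P.toList.all fun c =>
        decide (PySem.Raise.InRange Q.toList.length ((c.toNat : Int) - 97))) = true)
instance (P : String) (Q : String) (K : Int) : Decidable (Pre_maxNormalSubstring P Q K) := by
  unfold Pre_maxNormalSubstring; infer_instance

def pvWitness_maxNormalSubstring : String × String × Int := ("ab", "01", 1)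

def Spec_maxNormalSubstring (P : String) (Q : String) (K : Int) (out : Int) : Prop := out = maxNormalSubstring_alt P Q K
instance (P : String) (Q : String) (K : Int) (out : Int) : Decidable (Spec_maxNormalSubstring P Q K out) := by unfold Spec_maxNormalSubstring; infer_instance

-- ===== CLAIM (what is proved, stated in full; the proofs are below) =====
def Claim_equal_maxNormalSubstring : Prop := ∀ (P : String) (Q : String) (K : Int), Dom_maxNormalSubstring P Q K → Pre_maxNormalSubstring P Q K → Spec_maxNormalSubstring P Q K (maxNormalSubstring P Q K)

-- ===== LEMMAS AND PROOFS =====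

theorem pv_a1 (Q : String) (chars : List Char) (K' : Nat) (s : List Nat)
    (hmem : ∀ x, x < chars.length → ((x ∈ s) ↔ pvSpec Q (chars.getD x ' ') = true))
    (hlt : ∀ x ∈ s, x < chars.length)
    (hpair : List.Pairwise (· < ·) s) :
    ∀ (fuel r c : Nat) (left ans : Int) (s₁ s₂ : List Nat),
    s = s₁ ++ s₂ → (∀ x ∈ s₁, x < r) → (∀ x ∈ s₂, r ≤ x) →
    r ≤ chars.length → c ≤ K' → chars.length - r < fuel →
    pvAInner1 Q chars (chars.length : Int) (K' : Int) fuel left (r : Int) (c : Int) ans =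
      (((s₂.getD (K' - c) chars.length : Nat) : Int),
       ((c + min (K' - c) s₂.length : Nat) : Int),
       if r < s₂.getD (K' - c) chars.length
         then max ans (((s₂.getD (K' - c) chars.length : Nat) : Int) - left) else ans) := by
  intro fuel
  induction fuel with
  | zero => intro r c left ans s₁ s₂ hs h1 h2 hr hc hf; omega
  | succ f ih =>
    intro r c left ans s₁ s₂ hs h1 h2 hr hc hf
    rcases Nat.lt_or_ge r chars.length with hrn | hrn
    · -- r < n : guard true
      have hgetc : (PySem.List.pyGet? chars (r : Int)).getD ' ' = chars.getD r ' ' := by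
        simp [PySem.List.pyGet?_natCast, List.getD_eq_getElem?_getD]
      by_cases hp : pvSpec Q (chars.getD r ' ') = true
      · -- special char at r : r is the head of s₂
        have hrs : r ∈ s := (hmem r hrn).mpr hp
        have hrs2 : r ∈ s₂ := by
          rcases (List.mem_append.mp (hs ▸ hrs) : r ∈ s₁ ∨ r ∈ s₂) with h | h
          · exact absurd (h1 r h) (lt_irrefl r)
          · exact h
        cases s₂ with
        | nil => simp at hrs2
        | cons a t =>
        have hpair2 : List.Pairwise (· < ·) (a :: t) :=
          (hs ▸ hpair).sublist (List.sublist_append_right s₁ _)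
        have har : a = r := by
          rcases List.mem_cons.mp hrs2 with h | h
          · exact h.symm
          · have h3 := (List.pairwise_cons.mp hpair2).1 r h
            have h4 := h2 a List.mem_cons_self
            omega
        subst har
        rcases Nat.lt_or_ge c K' with hcK | hcK
        · -- count < K' : consume it
          have hstep : pvAInner1 Q chars (chars.length : Int) (K' : Int) (f+1) left (a : Int) (c : Int) ans =
              pvAInner1 Q chars (chars.length : Int) (K' : Int) f left ((a : Int)+1) ((c : Int)+1)
                (max ans ((a:Int)+1-left)) := by
            simp only [pvAInner1]
            rw [if_pos (by constructor <;> [exact_mod_cast hrn; exact_mod_cast hc])]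
            rw [hgetc]
            simp only [hp, if_true]
            rw [if_neg (by omega), if_pos (by omega)]
          rw [hstep]
          rw [show ((a:Int)+1) = ((a+1:Nat):Int) from by push_cast; ring,
              show ((c:Int)+1) = ((c+1:Nat):Int) from by push_cast; ring]
          have htgt : ∀ x ∈ t, a < x := (List.pairwise_cons.mp hpair2).1
          rw [ih (a+1) (c+1) left (max ans (((a+1:Nat):Int)-left)) (s₁ ++ [a]) t
            (by rw [hs]; simp)
            (by intro x hx
                rcases List.mem_append.mp hx with h | h
                · exact Nat.lt_succ_of_lt (h1 x h)
                · have : x = a := by simpa using h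
                  omega)
            (by intro x hx; exact htgt x hx) (by omega) (by omega) (by omega)]
          have hget : (a :: t).getD (K' - c) chars.length = t.getD (K' - (c+1)) chars.length := by
            rw [show K' - c = (K' - (c+1)) + 1 by omega]; rfl
          have hstop_gt : a < t.getD (K' - (c+1)) chars.length := by
            rcases Nat.lt_or_ge (K' - (c+1)) t.length with h | h
            · have h5 := List.getD_eq_getElem t chars.length h
              have hm := htgt (t[K' - (c+1)]) (List.getElem_mem h)
              omega
            · rw [List.getD_eq_default _ _ h]; omega
          rw [hget]
          simp only [Prod.mk.injEq]
          refine ⟨by trivial, ?_, ?_⟩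
          · have h5 : (c+1) + min (K'-(c+1)) t.length = c + min (K'-c) (a::t).length := by
              simp only [List.length_cons]; omega
            exact_mod_cast h5
          · rw [if_pos hstop_gt]
            rcases Nat.lt_or_ge (a+1) (t.getD (K' - (c+1)) chars.length) with h | h
            · rw [if_pos h]
              have h6 : ((a+1:Nat):Int) ≤ ((t.getD (K' - (c+1)) chars.length : Nat) : Int) := by
                exact_mod_cast Nat.le_of_lt h
              omega
            · rw [if_neg (by omega)]
              have h7 : t.getD (K' - (c+1)) chars.length = a + 1 := by omega
              rw [h7]
        · -- count = K' : break
          have hcK' : c = K' := by omega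
          have hbrk : pvAInner1 Q chars (chars.length : Int) (K' : Int) (f+1) left (a : Int) (c : Int) ans =
              ((a:Int), (c:Int), ans) := by
            simp only [pvAInner1]
            rw [if_pos (by constructor <;> [exact_mod_cast hrn; exact_mod_cast hc])]
            rw [hgetc]
            simp only [hp, if_true]
            rw [if_pos (by omega)]
          rw [hbrk]
          have h8 : K' - c = 0 := by omega
          simp [hcK']
      · -- normal char at r : r ∉ s, step over it
        have hrs : r ∉ s := fun h => hp ((hmem r hrn).mp h)
        have h2' : ∀ x ∈ s₂, r + 1 ≤ x := by
          intro x hx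
          have h9 := h2 x hx
          rcases Nat.eq_or_lt_of_le h9 with h | h
          · exact absurd (hs ▸ List.mem_append_right s₁ (h ▸ hx)) hrs
          · omega
        have hstep : pvAInner1 Q chars (chars.length : Int) (K' : Int) (f+1) left (r : Int) (c : Int) ans =
            pvAInner1 Q chars (chars.length : Int) (K' : Int) f left ((r : Int)+1) (c : Int)
              (max ans ((r:Int)+1-left)) := by
          simp only [pvAInner1]
          rw [if_pos (by constructor <;> [exact_mod_cast hrn; exact_mod_cast hc])]
          rw [hgetc]
          simp only [hp]
          rw [if_neg (by simp), if_pos (by omega)]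
        rw [hstep]
        rw [show ((r:Int)+1) = ((r+1:Nat):Int) from by push_cast; ring]
        rw [ih (r+1) c left (max ans (((r+1:Nat):Int)-left)) s₁ s₂ hs
          (fun x hx => Nat.lt_succ_of_lt (h1 x hx)) h2' (by omega) hc (by omega)]
        have hstop_ge : r + 1 ≤ s₂.getD (K' - c) chars.length := by
          rcases Nat.lt_or_ge (K' - c) s₂.length with h | h
          · have h5 := List.getD_eq_getElem s₂ chars.length h
            have hm := h2' (s₂[K' - c]) (List.getElem_mem h)
            omega
          · rw [List.getD_eq_default _ _ h]; omega
        simp only [Prod.mk.injEq]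
        refine ⟨by trivial, by trivial, ?_⟩
        rw [if_pos (show r < s₂.getD (K' - c) chars.length by omega)]
        rcases Nat.lt_or_ge (r+1) (s₂.getD (K' - c) chars.length) with h | h
        · rw [if_pos h]
          have h6 : ((r+1:Nat):Int) ≤ ((s₂.getD (K' - c) chars.length : Nat) : Int) := by
            exact_mod_cast Nat.le_of_lt h
          omega
        · rw [if_neg (by omega)]
          have h7 : s₂.getD (K' - c) chars.length = r + 1 := by omega
          rw [h7]
    · -- r = n : guard false, loop exits
      have hrn' : r = chars.length := by omega
      have hs2nil : s₂ = [] := by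
        cases s₂ with
        | nil => rfl
        | cons a t =>
          have h3 := h2 a List.mem_cons_self
          have h4 := hlt a (hs ▸ List.mem_append_right s₁ List.mem_cons_self)
          omega
      subst hs2nil
      simp only [pvAInner1]
      rw [if_neg (by omega)]
      simp [hrn']

theorem pv_a2 (Q : String) (chars : List Char) (K : Int) :
    ∀ (fuel l f : Nat) (right : Int),
    pvSpec Q (chars.getD f ' ') = true →
    (∀ x, l ≤ x → x < f → pvSpec Q (chars.getD x ' ') = false) →
    l ≤ f → (f : Int) < right → f - l < fuel →
    pvAInner2 Q chars K fuel (l : Int) right K = (((f : Int) + 1), K - 1) := by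
  intro fuel
  induction fuel with
  | zero => intro l f right hf hnone hlf hfr hfuel; omega
  | succ fu ih =>
    intro l f right hf hnone hlf hfr hfuel
    have hgetc : (PySem.List.pyGet? chars (l : Int)).getD ' ' = chars.getD l ' ' := by
      simp [PySem.List.pyGet?_natCast, List.getD_eq_getElem?_getD]
    rcases Nat.eq_or_lt_of_le hlf with heq | hlt
    · -- l = f : special, break
      subst heq
      simp only [pvAInner2]
      rw [if_pos (by omega), hgetc]
      simp only [hf, if_true]
      rw [if_pos (by omega)]
    · -- l < f : normal char, continue
      simp only [pvAInner2]
      rw [if_pos (by omega), hgetc]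
      simp only [hnone l le_rfl hlt, Bool.false_eq_true, if_false]
      rw [if_neg (by omega)]
      rw [show ((l:Int)+1) = ((l+1:Nat):Int) from by push_cast; ring]
      exact ih (l+1) f right hf (fun x hx1 hx2 => hnone x (by omega) hx2) (by omega) hfr (by omega)

def pvAug (s : List Nat) (n : Nat) : Nat → Int := fun t =>
  if t = 0 then -1 else if t ≤ s.length then ((s.getD (t-1) 0 : Nat) : Int) else (n : Int)

def pvCand (s : List Nat) (n K' : Nat) (t : Nat) : Int :=
  pvAug s n (t + K') - pvAug s n (t - 1) - 1

theorem pv_a3 (Q : String) (chars : List Char) (K' : Nat) (s : List Nat)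
    (hmem : ∀ x, x < chars.length → ((x ∈ s) ↔ pvSpec Q (chars.getD x ' ') = true))
    (hlt : ∀ x ∈ s, x < chars.length)
    (hpair : List.Pairwise (· < ·) s)
    (hK' : 1 ≤ K') :
    ∀ (fuel j : Nat) (ans : Int), j + K' < s.length → s.length - K' - j < fuel →
    pvAOuter Q chars (chars.length : Int) (K' : Int) fuel
        ((s.getD j 0 : Nat) + 1 : Int) ((s.getD (j + K') 0 : Nat) : Int) ((K' : Int) - 1) ans
      = List.foldl max ans ((List.range' (j+2) (s.length - K' - j)).map (pvCand s chars.length K')) := by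
  have hmono : ∀ (i j : Nat) (hi : i < s.length) (hj : j < s.length), i < j → s[i] < s[j] :=
    fun i j hi hj hij => List.pairwise_iff_getElem.mp hpair i j hi hj hij
  intro fuel
  induction fuel with
  | zero => intro j ans hj hfuel; omega
  | succ f ih =>
    intro j ans hj hfuel
    have hjm : j < s.length := by omega
    have hj1m : j + 1 < s.length := by omega
    have hjKm : j + K' < s.length := by omega
    have hsjn : s[j] < chars.length := hlt _ (List.getElem_mem hjm)
    have hsj1n : s[j+1] < chars.length := hlt _ (List.getElem_mem hj1m)
    have hsjKn : s[j+K'] < chars.length := hlt _ (List.getElem_mem hjKm)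
    have hgj : s.getD j 0 = s[j] := List.getD_eq_getElem s 0 hjm
    have hgjK : s.getD (j + K') 0 = s[j+K'] := List.getD_eq_getElem s 0 hjKm
    -- the value `right` stops at : next special after s[j+K'], or the length of P
    set D : Nat := (s.drop (j + K')).getD 1 chars.length with hD
    have hdropg : ∀ (i : Nat),
        (s.drop (j + K')).getD i chars.length
          = if _ : j + K' + i < s.length then s[j+K'+i] else chars.length := by
      intro i
      rcases Nat.lt_or_ge (j + K' + i) s.length with h | h
      · rw [dif_pos h]
        have hh : i < (s.drop (j + K')).length := by
          simp only [List.length_drop]; omega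
        rw [List.getD_eq_getElem _ _ hh, List.getElem_drop]
      · rw [dif_neg (by omega)]
        exact List.getD_eq_default _ _ (by simp only [List.length_drop]; omega)
    have hDgt : s[j+K'] < D := by
      rw [hD, hdropg 1]
      split
      · exact hmono _ _ hjKm (by omega) (by omega)
      · omega
    have hDj1 : s[j+1] < D := by
      rw [hD, hdropg 1]
      split
      · exact hmono (j+1) _ hj1m (by omega) (by omega)
      · omega
    -- one unfolding of the outer loop
    simp only [pvAOuter]
    rw [if_pos (by rw [hgjK]; exact_mod_cast hsjKn)]
    -- inner loop 1
    rw [show ((K' : Int) - 1) = ((K' - 1 : Nat) : Int) from by push_cast [hK']; ring, hgjK]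
    rw [pv_a1 Q chars K' s hmem hlt hpair (chars.length+1) s[j+K'] (K'-1) _ ans
        (s.take (j+K')) (s.drop (j+K')) (List.take_append_drop _ s).symm
        (by intro x hx
            obtain ⟨i, hi, rfl⟩ := List.mem_iff_getElem.mp hx
            simp only [List.length_take, lt_min_iff] at hi
            rw [List.getElem_take]
            exact hmono i (j+K') hi.2 hjKm hi.1)
        (by intro x hx
            obtain ⟨i, hi, rfl⟩ := List.mem_iff_getElem.mp hx
            simp only [List.length_drop] at hi
            rw [List.getElem_drop]
            rcases Nat.eq_zero_or_pos i with h0 | h0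
            · simp [h0]
            · exact le_of_lt (hmono (j+K') (j+K'+i) hjKm (by omega) (by omega)))
        (le_of_lt hsjKn) (by omega) (by omega)]
    rw [show K' - (K' - 1) = 1 from by omega, ← hD]
    rw [if_pos hDgt]
    dsimp only
    -- count after inner loop 1 is K'
    have hlen2 : min 1 (s.drop (j + K')).length = 1 := by
      simp only [List.length_drop]; omega
    rw [hlen2, show K' - 1 + 1 = K' from by omega]
    -- inner loop 2
    have hspec1 : pvSpec Q (chars.getD s[j+1] ' ') = true :=
      (hmem _ hsj1n).mp (List.getElem_mem hj1m)
    have hnone1 : ∀ x, s[j] + 1 ≤ x → x < s[j+1] → pvSpec Q (chars.getD x ' ') = false := by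
      intro x hx1 hx2
      by_contra hcon
      have hxs : x ∈ s := (hmem x (by omega)).mpr (by simpa using hcon)
      obtain ⟨i, hi, rfl⟩ := List.mem_iff_getElem.mp hxs
      rcases Nat.lt_or_ge i (j+1) with h | h
      · rcases Nat.eq_or_lt_of_le (Nat.lt_succ_iff.mp h) with h' | h'
        · subst h'; omega
        · have := hmono i j (by omega) hjm h'
          omega
      · rcases Nat.eq_or_lt_of_le h with h' | h'
        · subst h'; omega
        · have := hmono (j+1) i hj1m hi h'
          omega
    rw [hgj, show ((s[j] : Nat) : Int) + 1 = ((s[j] + 1 : Nat) : Int) from by push_cast; ring]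
    rw [pv_a2 Q chars (K' : Int) (chars.length+1) (s[j]+1) s[j+1] _ hspec1 hnone1
        (by have := hmono j (j+1) hjm hj1m (by omega); omega)
        (by exact_mod_cast hDj1) (by omega)]
    dsimp only
    -- now recurse
    rcases Nat.lt_or_ge (j + K' + 1) s.length with hlast | hlast
    · -- another phase follows
      have hgd : s.getD (j+1+K') 0 = s[j+K'+1] := by
        rw [show j+1+K' = j+K'+1 from by omega]
        exact List.getD_eq_getElem s 0 (by omega)
      have hDval : D = s[j+K'+1] := by rw [hD, hdropg 1, dif_pos (by omega)]
      have hrw1 : ((s[j+1] : Nat) : Int) + 1 = ((s.getD (j+1) 0 : Nat) + 1 : Int) := by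
        rw [List.getD_eq_getElem s 0 hj1m]
      have hrw2 : ((D : Nat) : Int) = ((s.getD (j+1+K') 0 : Nat) : Int) := by
        rw [hDval, hgd]
      rw [show ((K' : Int) - 1) = ((K' - 1 : Nat) : Int) from by push_cast [hK']; ring] at ih ⊢
      rw [hrw1, hrw2]
      rw [ih (j+1) _ (by omega) (by omega)]
      -- peel the first candidate off the fold
      have hpeel : List.range' (j+2) (s.length - K' - j) = (j+2) :: List.range' (j+3) (s.length - K' - (j+1)) := by
        rw [show s.length - K' - j = (s.length - K' - (j+1)) + 1 from by omega, List.range'_succ]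
      rw [hpeel, List.map_cons, List.foldl_cons]
      congr 1
      have hc : pvCand s chars.length K' (j+2) = ((s[j+K'+1] : Nat) : Int) - ((s[j] : Nat) : Int) - 1 := by
        unfold pvCand pvAug
        rw [if_neg (by omega), if_pos (by omega), if_neg (by omega), if_pos (by omega)]
        rw [show j + 2 + K' - 1 = j + 1 + K' from by omega, show j + 2 - 1 - 1 = j from by omega]
        rw [hgd, List.getD_eq_getElem s 0 hjm]
      rw [hgd]
      push_cast
      omega
    · -- this was the last phase : right = chars.length, outer loop exits
      have hDval : D = chars.length := by rw [hD, hdropg 1, dif_neg (by omega)]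
      have hlast' : j + K' + 1 = s.length := by omega
      cases f with
      | zero => omega
      | succ f' =>
        simp only [pvAOuter]
        rw [if_neg (by rw [hDval]; exact lt_irrefl _)]
        rw [show s.length - K' - j = 1 from by omega]
        simp only [List.range'_one, List.map_cons, List.map_nil, List.foldl_cons, List.foldl_nil]
        have hc : pvCand s chars.length K' (j+2) = (chars.length : Int) - ((s[j] : Nat) : Int) - 1 := by
          unfold pvCand pvAug
          rw [if_neg (by omega), if_neg (by omega), if_neg (by omega), if_pos (by omega)]
          rw [show j + 2 - 1 - 1 = j from by omega, List.getD_eq_getElem s 0 hjm]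
        rw [hc, hDval]
        push_cast
        omega

theorem pv_nodup_len (s : List Nat) (n : Nat) (hpair : List.Pairwise (· < ·) s)
    (hlt : ∀ x ∈ s, x < n) : s.length ≤ n := by
  have hnd : s.Nodup := hpair.imp Nat.ne_of_lt
  have hsub : s ⊆ List.range n := fun x hx => List.mem_range.mpr (hlt x hx)
  simpa using (hnd.subperm hsub).length_le

theorem pv_a4 (Q : String) (chars : List Char) (K' : Nat) (s : List Nat)
    (hmem : ∀ x, x < chars.length → ((x ∈ s) ↔ pvSpec Q (chars.getD x ' ') = true))
    (hlt : ∀ x ∈ s, x < chars.length)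
    (hpair : List.Pairwise (· < ·) s)
    (hK' : 1 ≤ K') :
    pvAOuter Q chars (chars.length : Int) (K' : Int) (2*chars.length+2) 0 0 0 0
      = if s.length ≤ K' then (chars.length : Int)
        else List.foldl max 0 ((List.range' 1 (s.length - K' + 1)).map (pvCand s chars.length K')) := by
  have hmono : ∀ (i j : Nat) (hi : i < s.length) (hj : j < s.length), i < j → s[i] < s[j] :=
    fun i j hi hj hij => List.pairwise_iff_getElem.mp hpair i j hi hj hij
  have hmn : s.length ≤ chars.length := pv_nodup_len s chars.length hpair hlt
  obtain ⟨F, hF⟩ : ∃ F, 2*chars.length+2 = F + 1 ∧ F = 2*chars.length+1 := ⟨_, rfl, rfl⟩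
  rcases Nat.eq_zero_or_pos chars.length with hn0 | hn0
  · -- empty string
    rw [hF.1]
    simp only [pvAOuter]
    rw [if_neg (by omega), if_pos (by omega)]
    omega
  · rw [hF.1]
    simp only [pvAOuter]
    rw [if_pos (by exact_mod_cast hn0)]
    have H1 := pv_a1 Q chars K' s hmem hlt hpair (chars.length+1) 0 0 0 0 [] s rfl
      (by simp) (by simp) (by omega) (by omega) (by omega)
    simp only [Nat.cast_zero, Nat.sub_zero, Nat.zero_add, sub_zero] at H1
    rcases Nat.lt_or_ge K' s.length with hKm | hKm
    · -- more than K' specials : phase 1 stops at s[K']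
      have h0m : 0 < s.length := by omega
      have hgK : s.getD K' chars.length = s[K'] := List.getD_eq_getElem s chars.length hKm
      have hsK1 : 0 < s[K'] := by
        have := hmono 0 K' h0m hKm (by omega)
        omega
      rw [hgK, if_pos hsK1, show min K' s.length = K' from by omega] at H1
      rw [H1]
      dsimp only
      -- inner loop 2 : left walks to s[0]+1
      have hs0n : s[0] < chars.length := hlt _ (List.getElem_mem h0m)
      have hspec0 : pvSpec Q (chars.getD s[0] ' ') = true := (hmem _ hs0n).mp (List.getElem_mem h0m)
      have hnone0 : ∀ x, 0 ≤ x → x < s[0] → pvSpec Q (chars.getD x ' ') = false := by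
        intro x _ hx2
        by_contra hcon
        have hxs : x ∈ s := (hmem x (by omega)).mpr (by simpa using hcon)
        obtain ⟨i, hi, rfl⟩ := List.mem_iff_getElem.mp hxs
        rcases Nat.eq_zero_or_pos i with h0 | h0
        · subst h0; omega
        · have := hmono 0 i h0m hi h0
          omega
      have H2 := pv_a2 Q chars (K' : Int) (chars.length+1) 0 s[0] ((s[K'] : Nat) : Int)
        hspec0 (fun x hx1 hx2 => hnone0 x (by omega) hx2) (by omega)
        (by exact_mod_cast hmono 0 K' h0m hKm (by omega)) (by omega)
      simp only [Nat.cast_zero] at H2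
      rw [H2]
      dsimp only
      rw [if_neg (by omega)]
      -- steady phases via pv_a3 with j = 0
      have hg0 : ((s[0] : Nat) : Int) + 1 = ((s.getD 0 0 : Nat) + 1 : Int) := by
        rw [List.getD_eq_getElem s 0 h0m]
      have hgK' : ((s[K'] : Nat) : Int) = ((s.getD (0 + K') 0 : Nat) : Int) := by
        rw [show 0 + K' = K' from by omega, List.getD_eq_getElem s 0 hKm]
      rw [hg0, hgK']
      rw [pv_a3 Q chars K' s hmem hlt hpair hK' F 0
        (max 0 ((s.getD (0 + K') 0 : Nat) : Int)) (by omega) (by omega)]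
      -- glue the first candidate back on
      have hpeel : List.range' 1 (s.length - K' + 1) = 1 :: List.range' 2 (s.length - K' - 0) := by
        rw [show s.length - K' + 1 = (s.length - K' - 0) + 1 from by omega, List.range'_succ]
      rw [hpeel, List.map_cons, List.foldl_cons]
      congr 1
      have hc : pvCand s chars.length K' 1 = ((s[K'] : Nat) : Int) := by
        unfold pvCand pvAug
        rw [if_neg (by omega), if_pos (by omega), if_pos (by omega)]
        rw [show 1 + K' - 1 = K' from by omega, List.getD_eq_getElem s 0 hKm]
        ring
      rw [hc, show 0 + K' = K' from by omega, List.getD_eq_getElem s 0 hKm]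
    · -- at most K' specials : the whole string qualifies
      rw [List.getD_eq_default _ _ (by omega), if_pos (by omega),
          show min K' s.length = s.length from by omega] at H1
      rw [H1]
      dsimp only
      rw [if_pos hKm]
      obtain ⟨G, hG⟩ : ∃ G, F = G + 1 := ⟨2*chars.length, by omega⟩
      rw [hG]
      simp only [pvAOuter]
      rw [if_neg (lt_irrefl _)]
      omega

-- B's special-position list, as natural numbers
def pvSIdx (Q : String) (chars : List Char) : List Nat :=
  (chars.zipIdx.filter (fun ci => pvSpec Q ci.1)).map Prod.snd

theorem pvSIdx_cast (Q : String) (chars : List Char) :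
    pvBSpecIdx Q chars = (pvSIdx Q chars).map (fun i : Nat => (i : Int)) := by
  unfold pvBSpecIdx pvSIdx
  rw [List.map_map]
  rfl

theorem pvSIdx_pairwise (Q : String) (chars : List Char) :
    List.Pairwise (· < ·) (pvSIdx Q chars) := by
  unfold pvSIdx
  rw [List.pairwise_map]
  refine List.Pairwise.filter _ ?_
  rw [List.pairwise_iff_getElem]
  intro i j hi hj hij
  rw [List.getElem_zipIdx, List.getElem_zipIdx]
  simpa using hij

theorem pvSIdx_lt (Q : String) (chars : List Char) :
    ∀ x ∈ pvSIdx Q chars, x < chars.length := by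
  intro x hx
  unfold pvSIdx at hx
  obtain ⟨ci, hci, rfl⟩ := List.mem_map.mp hx
  have h1 : ci ∈ chars.zipIdx := (List.mem_filter.mp hci).1
  have h2 := List.mem_zipIdx (x := ci.1) (i := ci.2) (by simpa using h1)
  omega

theorem pvSIdx_mem (Q : String) (chars : List Char) :
    ∀ x, x < chars.length → ((x ∈ pvSIdx Q chars) ↔ pvSpec Q (chars.getD x ' ') = true) := by
  intro x hxn
  have hgd : chars.getD x ' ' = chars[x] := List.getD_eq_getElem chars ' ' hxn
  unfold pvSIdx
  constructor
  · intro hx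
    obtain ⟨ci, hci, rfl⟩ := List.mem_map.mp hx
    obtain ⟨h1, h2⟩ := List.mem_filter.mp hci
    have h3 := List.mem_zipIdx (x := ci.1) (i := ci.2) (by simpa using h1)
    rw [hgd, ← show ci.1 = chars[ci.2] by simpa using h3.2.2]
    simpa using h2
  · intro hx
    rw [hgd] at hx
    refine List.mem_map.mpr ⟨(chars[x], x), List.mem_filter.mpr ⟨?_, by simpa using hx⟩, rfl⟩
    exact List.mem_zipIdx_iff_getElem?.mpr (by simp [hxn])

theorem pv_aug_getD (s : List Nat) (n : Nat) :
    ∀ (t : Nat), t < s.length + 2 →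
      ((((-1 : Int) :: s.map (fun i : Nat => (i : Int))) ++ [(n : Int)]).getD t 0) = pvAug s n t := by
  intro t ht
  rw [List.cons_append]
  cases t with
  | zero => simp [pvAug]
  | succ t' =>
    rw [List.getD_cons_succ]
    unfold pvAug
    rw [if_neg (Nat.succ_ne_zero t')]
    rcases Nat.lt_or_ge t' s.length with h | h
    · rw [if_pos (by omega)]
      rw [List.getD_append _ _ _ _ (by simpa using h)]
      rw [List.getD_eq_getElem _ _ (by simpa using h), List.getElem_map]
      rw [show t' + 1 - 1 = t' from by omega, List.getD_eq_getElem s 0 h]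
    · rw [if_neg (by omega)]
      have ht' : t' = s.length := by omega
      subst ht'
      rw [List.getD_eq_getElem?_getD, List.getElem?_append_right (by simp)]
      simp

theorem pv_b (P Q : String) (K' : Nat) (hK' : 1 ≤ K') :
    maxNormalSubstring_alt P Q (K' : Int)
      = if (pvSIdx Q P.toList).length ≤ K' then (P.toList.length : Int)
        else List.foldl max 0 ((List.range' 1 ((pvSIdx Q P.toList).length - K' + 1)).map
              (pvCand (pvSIdx Q P.toList) P.toList.length K')) := by
  simp only [maxNormalSubstring_alt]
  rw [if_neg (by exact_mod_cast by omega : ¬ ((K' : Int) ≤ 0))]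
  rw [pvSIdx_cast]
  set s : List Nat := pvSIdx Q P.toList with hs
  rw [List.length_map]
  rcases Nat.lt_or_ge K' s.length with hKm | hKm
  · -- more specials than K'
    rw [if_neg (by exact_mod_cast by omega : ¬ ((s.length : Int) ≤ (K' : Int))), if_neg (by omega)]
    -- the candidate list is the mapped range
    have hcands :
        (PySem.List.pyRange 1 ((s.length : Int) - (K' : Int) + 2) 1).map
            (fun t => PySem.List.pyGetD (((-1 : Int) :: s.map (fun i : Nat => (i : Int))) ++ [(P.toList.length : Int)]) (t + (K' : Int)) 0
              - PySem.List.pyGetD (((-1 : Int) :: s.map (fun i : Nat => (i : Int))) ++ [(P.toList.length : Int)]) (t - 1) 0 - 1)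
          = (List.range' 1 (s.length - K' + 1)).map (pvCand s P.toList.length K') := by
      rw [show ((s.length : Int) - (K' : Int) + 2) = ((s.length - K' + 2 : Nat) : Int) from by omega]
      rw [PySem.List.pyRange_one, show ((s.length - K' + 2 : Nat) : Int) - 1 = ((s.length - K' + 1 : Nat) : Int) from by omega]
      rw [Int.toNat_natCast, List.range'_eq_map_range, List.map_map, List.map_map]
      refine List.map_congr_left ?_
      intro k hk
      rw [List.mem_range] at hk
      simp only [Function.comp]
      rw [show (1 : Int) + (k : Nat) + (K' : Int) = ((1 + k + K' : Nat) : Int) from by omega]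
      rw [show (1 : Int) + (k : Nat) - 1 = ((k : Nat) : Int) from by omega]
      rw [PySem.List.pyGetD_natCast, PySem.List.pyGetD_natCast]
      rw [pv_aug_getD s P.toList.length (1 + k + K') (by omega), pv_aug_getD s P.toList.length k (by omega)]
      unfold pvCand
      rw [show 1 + k + K' = 1 + k + K' from rfl, show 1 + k - 1 = k from by omega]
    rw [hcands]
    -- Python's max(...) is the running-max fold
    rw [show s.length - K' + 1 = (s.length - K') + 1 from rfl, List.range'_succ, List.map_cons]
    rw [PySem.List.max?_id_cons, Option.getD_some, List.foldl_cons]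
    have hc1 : 0 ≤ pvCand s P.toList.length K' 1 := by
      unfold pvCand pvAug
      rw [if_neg (by omega), if_pos (by omega)]
      split <;> omega
    rw [show max 0 (pvCand s P.toList.length K' 1) = pvCand s P.toList.length K' 1 from by omega]
  · -- at most K' specials
    rw [if_pos (by exact_mod_cast hKm), if_pos hKm]


theorem pv_final (P : String) (Q : String) (K : Int) (hpre : Pre_maxNormalSubstring P Q K) :
    maxNormalSubstring P Q K = maxNormalSubstring_alt P Q K := by
  by_cases hK0 : K = 0
  · subst hK0
    simp [maxNormalSubstring, maxNormalSubstring_alt]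
  by_cases hKneg : K ≤ 0
  · -- from Pre_ : P must be empty
    rcases hpre with h | h | ⟨h, _⟩
    · exact absurd h hK0
    · simp only [maxNormalSubstring, maxNormalSubstring_alt, h]
      rw [if_neg hK0, if_pos hKneg]
      simp [pvAOuter]
    · omega
  · -- K > 0
    obtain ⟨K', hK, hK'⟩ : ∃ K' : Nat, K = (K' : Int) ∧ 1 ≤ K' :=
      ⟨K.toNat, by omega, by omega⟩
    subst hK
    simp only [maxNormalSubstring]
    rw [if_neg hK0]
    rw [pv_a4 Q P.toList K' (pvSIdx Q P.toList) (pvSIdx_mem Q P.toList)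
        (pvSIdx_lt Q P.toList) (pvSIdx_pairwise Q P.toList) hK']
    rw [pv_b P Q K' hK']

-- ===== VERDICT (by name: the statement is the Claim_ definition above) =====
theorem maxNormalSubstring_spec : Claim_equal_maxNormalSubstring := by
  intro P Q K hdom hpre
  unfold Spec_maxNormalSubstring
  exact pv_final P Q K hpre
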